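-- pv_equiv track=rewrite | github.com/aasalerno/testgen | testtex/balanceEqns.py | chemical_equation_string
-- ===== SOURCE A (Python) =====
-- def chemical_equation_string(vals,atype):
--     r = vals[0]
--     p = vals[1]
--     s = []
--     for i in r.keys():
--         if r[i]>1:
--             s.append(str(r[i]))
--         s.append(i)
--         s.append('+')
--     s[-1]=atype
--     for i in p.keys():
--         if p[i] > 1:
--             s.append(str(p[i]))
--         s.append(i)
--         s.append('+')
--     s=s[:-1]
--     return ' '.join(s)
-- ===== SOURCE B (Python) =====
-- def chemical_equation_string(vals, atype):
--     reactants = vals[0]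
--     products = vals[1]
--     items = list(reactants.items()) + list(products.items())
--
--     def rec(rest, i):
--         sp, c = rest[0]
--         term = (str(c) + ' ' + sp) if c > 1 else sp
--         if len(rest) == 1:
--             return term
--         sep = atype if i + 1 == len(reactants) else '+'
--         return term + ' ' + sep + ' ' + rec(rest[1:], i + 1)
--
--     return rec(items, 0)
-- ===== Notes on version B (the rewrite author's own statement) =====
-- stated objective: alternative
-- what changed: A builds a mutable token list with a sentinel '+' after every species, patches s[-1]=atype and slices s[:-1]; B concatenates the two item lists once and emits the string by a single recursion over that combined list, choosing each separator positionally (the arrow exactly at index len(reactants), '+' elsewhere), which also makes the empty-products case (no arrow) fall out of the boundary-equals-end coincidence rather than a patch.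
import Mathlib
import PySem

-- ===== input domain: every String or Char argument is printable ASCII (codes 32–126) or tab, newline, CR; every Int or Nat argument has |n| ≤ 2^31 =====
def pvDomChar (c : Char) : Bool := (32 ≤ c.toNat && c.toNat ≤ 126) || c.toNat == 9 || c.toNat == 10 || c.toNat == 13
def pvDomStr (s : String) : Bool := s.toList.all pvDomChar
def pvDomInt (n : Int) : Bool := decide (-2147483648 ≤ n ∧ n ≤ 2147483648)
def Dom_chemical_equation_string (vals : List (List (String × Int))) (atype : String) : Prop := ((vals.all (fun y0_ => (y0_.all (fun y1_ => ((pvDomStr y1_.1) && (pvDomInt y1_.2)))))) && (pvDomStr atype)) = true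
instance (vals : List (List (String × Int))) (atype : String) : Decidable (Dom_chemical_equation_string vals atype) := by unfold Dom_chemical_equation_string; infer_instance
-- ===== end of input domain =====

-- B emits the equation by one recursion over the concatenated reactant+product item list with a
-- positionally chosen separator (arrow exactly at the side boundary), instead of A's sentinel-'+'
-- token list patched by s[-1]=atype and sliced by s[:-1]; equal return values on Pre_.


-- ===== PORT A =====
-- The Python dicts arrive as association lists; each is decoded with PySem.Dict.ofList
-- (Python dict-construction semantics: first position, last value).  `s[-1] = atype`
-- raises IndexError when s is empty — those inputs are outside Pre_ below; the port
-- writes `s.dropLast ++ [atype]`, exact whenever s ≠ [].  `s[:-1]` is `dropLast` (exact on all lists).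
def chemical_equation_string (vals : List (List (String × Int))) (atype : String) : String :=
  let r : PySem.Dict String Int := PySem.Dict.ofList ((PySem.List.pyGet? vals 0).getD [])   -- r = vals[0]
  let p : PySem.Dict String Int := PySem.Dict.ofList ((PySem.List.pyGet? vals 1).getD [])   -- p = vals[1]
  let s : List String :=
    r.keys.foldl (fun s i =>
      ((if r.getD i 0 > 1 then s ++ [PySem.Int.toStr (r.getD i 0)] else s) ++ [i]) ++ ["+"]) []
  let s := s.dropLast ++ [atype]            -- s[-1] = atype
  let s :=
    p.keys.foldl (fun s i =>
      ((if p.getD i 0 > 1 then s ++ [PySem.Int.toStr (p.getD i 0)] else s) ++ [i]) ++ ["+"]) s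
  let s := s.dropLast                       -- s = s[:-1]
  PySem.Str.join " " s

-- ===== PORT B =====
-- B's inner `rec(rest, i)`: recursion over the remaining items with the running index i;
-- `rest[0]` on an empty list raises in Python (unreachable inside Pre_) — ported as "".
def pvRecB (atype : String) (arrowAt : Nat) : List (String × Int) → Nat → String
  | [], _ => ""
  | q :: rest, i =>
    let term := if q.2 > 1 then PySem.Int.toStr q.2 ++ " " ++ q.1 else q.1
    if rest = [] then term
    else term ++ " " ++ (if i + 1 = arrowAt then atype else "+") ++ " " ++ pvRecB atype arrowAt rest (i + 1)

def chemical_equation_string_alt (vals : List (List (String × Int))) (atype : String) : String :=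
  let reactants : PySem.Dict String Int := PySem.Dict.ofList ((PySem.List.pyGet? vals 0).getD [])
  let products : PySem.Dict String Int := PySem.Dict.ofList ((PySem.List.pyGet? vals 1).getD [])
  let items := reactants.items ++ products.items
  pvRecB atype reactants.size items 0

-- ===== PRECONDITION & SPEC =====
-- Pre_ excludes exactly the inputs where the Python A raises: fewer than two dicts
-- (IndexError on vals[1]) or an empty reactants dict (IndexError on s[-1] = atype).
def Pre_chemical_equation_string (vals : List (List (String × Int))) (atype : String) : Prop :=
  2 ≤ vals.length ∧ vals.headI ≠ []
instance (vals : List (List (String × Int))) (atype : String) : Decidable (Pre_chemical_equation_string vals atype) := by unfold Pre_chemical_equation_string; infer_instance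

def pvWitness_chemical_equation_string : (List (List (String × Int))) × String :=
  ([[("H2", 2), ("O2", 1)], [("H2O", 2)]], "->")

def Spec_chemical_equation_string (vals : List (List (String × Int))) (atype : String) (out : String) : Prop := out = chemical_equation_string_alt vals atype
instance (vals : List (List (String × Int))) (atype : String) (out : String) : Decidable (Spec_chemical_equation_string vals atype out) := by unfold Spec_chemical_equation_string; infer_instance

-- ===== CLAIM (what is proved, stated in full; the proofs are below) =====
def Claim_equal_chemical_equation_string : Prop := ∀ (vals : List (List (String × Int))) (atype : String), Dom_chemical_equation_string vals atype → Pre_chemical_equation_string vals atype → Spec_chemical_equation_string vals atype (chemical_equation_string vals atype)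

-- ===== LEMMAS AND PROOFS =====

def pvTerm (species : String) (coeff : Int) : String :=
  if coeff > 1 then PySem.Int.toStr coeff ++ " " ++ species else species

def pvSide (d : PySem.Dict String Int) : String :=
  PySem.Str.join " + " (d.items.map (fun q => pvTerm q.1 q.2))

-- the tokens one species contributes in A's loop (coefficient token when > 1, then the species)
def pvTok (d : PySem.Dict String Int) (i : String) : List String :=
  (if d.getD i 0 > 1 then [PySem.Int.toStr (d.getD i 0)] else []) ++ [i]

theorem pvTok_ne_nil (d : PySem.Dict String Int) (i : String) : pvTok d i ≠ [] := by
  unfold pvTok; split_ifs <;> simp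

-- A's loop body as a flatMap
theorem pv_foldA (d : PySem.Dict String Int) (l : List String) (acc : List String) :
    l.foldl (fun s i =>
      ((if d.getD i 0 > 1 then s ++ [PySem.Int.toStr (d.getD i 0)] else s) ++ [i]) ++ ["+"]) acc
    = acc ++ l.flatMap (fun i => pvTok d i ++ ["+"]) := by
  have h : (fun (s : List String) (i : String) =>
      ((if d.getD i 0 > 1 then s ++ [PySem.Int.toStr (d.getD i 0)] else s) ++ [i]) ++ ["+"])
      = fun s i => s ++ (pvTok d i ++ ["+"]) := by
    funext s i; unfold pvTok; split_ifs <;> simp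
  rw [h, PySem.List.foldl_append_eq_flatMap]

theorem pv_chars_join_append (sep : List Char) (xs ys : List (List Char)) (hx : xs ≠ []) (hy : ys ≠ []) :
    PySem.Chars.join sep (xs ++ ys) = PySem.Chars.join sep xs ++ sep ++ PySem.Chars.join sep ys := by
  induction xs with
  | nil => exact absurd rfl hx
  | cons x xs ih =>
    cases xs with
    | nil =>
      obtain ⟨y, ys', rfl⟩ := List.exists_cons_of_ne_nil hy
      rw [List.singleton_append, PySem.Chars.join_cons_cons, PySem.Chars.join_singleton]
    | cons x2 xs' =>
      show PySem.Chars.join sep (x :: x2 :: (xs' ++ ys)) = _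
      rw [PySem.Chars.join_cons_cons, ← List.cons_append, ih (by simp), PySem.Chars.join_cons_cons]
      simp

theorem pv_join_append (sep : String) (xs ys : List String) (hx : xs ≠ []) (hy : ys ≠ []) :
    PySem.Str.join sep (xs ++ ys) = PySem.Str.join sep xs ++ sep ++ PySem.Str.join sep ys := by
  rw [← String.toList_inj]
  simp only [PySem.Str.toList_join, String.toList_append, List.map_append]
  rw [pv_chars_join_append sep.toList _ _ (by simpa) (by simpa)]

theorem pv_join_singleton (sep x : String) : PySem.Str.join sep [x] = x := by
  rw [← String.toList_inj]
  simp [PySem.Str.toList_join, PySem.Chars.join_singleton]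

theorem pv_join_cons_cons (sep a b : String) (rest : List String) :
    PySem.Str.join sep (a :: b :: rest) = a ++ sep ++ PySem.Str.join sep (b :: rest) := by
  rw [← String.toList_inj]
  simp [PySem.Str.toList_join, PySem.Chars.join_cons_cons]

-- the flatMap of per-species chunks, last '+' dropped, is never empty
theorem pv_drop_ne_nil {γ : Type} (l : List γ) (tk : γ → List String)
    (h : ∀ i ∈ l, tk i ≠ []) (hl : l ≠ []) :
    (l.flatMap (fun i => tk i ++ ["+"])).dropLast ≠ [] := by
  obtain ⟨j, l', rfl⟩ := List.exists_cons_of_ne_nil hl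
  have htj := h j (by simp)
  rw [List.flatMap_cons, List.append_assoc, List.dropLast_append_of_ne_nil (by simp)]
  simp [htj]

-- core: ' '.join of chunked tokens with a '+' between chunks (last one dropped)
-- equals ' + '.join of the per-chunk ' '.joins
theorem pv_join_plus {γ : Type} (l : List γ) (tk : γ → List String)
    (h : ∀ i ∈ l, tk i ≠ []) (hl : l ≠ []) :
    PySem.Str.join " " ((l.flatMap (fun i => tk i ++ ["+"])).dropLast)
    = PySem.Str.join " + " (l.map (fun i => PySem.Str.join " " (tk i))) := by
  induction l with
  | nil => exact absurd rfl hl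
  | cons i l' ih =>
    cases l' with
    | nil =>
      simp only [List.flatMap_cons, List.flatMap_nil, List.append_nil, List.map_cons, List.map_nil]
      rw [show tk i ++ ["+"] = (tk i) ++ ["+"] from rfl, List.dropLast_concat, pv_join_singleton]
    | cons j l'' =>
      have h' : ∀ x ∈ j :: l'', tk x ≠ [] := fun x hx => h x (by simp [hx])
      have hF : (List.flatMap (fun i => tk i ++ ["+"]) (j :: l'')) ≠ [] := by
        rw [List.flatMap_cons]; simp
      have hFd : (List.flatMap (fun i => tk i ++ ["+"]) (j :: l'')).dropLast ≠ [] :=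
        pv_drop_ne_nil _ _ h' (by simp)
      rw [List.flatMap_cons, List.append_assoc, List.dropLast_append_of_ne_nil (by simp),
          List.dropLast_append_of_ne_nil hF]
      rw [← List.append_assoc,
          pv_join_append " " _ _ (by simp [h i (by simp)]) hFd,
          pv_join_append " " _ _ (h i (by simp)) (by simp),
          pv_join_singleton, ih h' (by simp)]
      simp only [List.map_cons]
      rw [pv_join_cons_cons]
      have hmid : (" " ++ ("+" ++ " ") : String) = " + " := by decide
      simp only [String.append_assoc, hmid]

-- keys of a dict built from a pair list
theorem pv_keys_ofList (ps : List (String × Int)) :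
    (PySem.Dict.ofList ps).keys = PySem.Set.ofList (ps.map Prod.fst) := by
  simp [PySem.Dict.ofList, PySem.Dict.update, PySem.Dict.keys_foldl_insert_key,
        PySem.Set.update_nil_left]

theorem pv_keys_ofList_ne_nil (ps : List (String × Int)) (hps : ps ≠ []) :
    (PySem.Dict.ofList ps).keys ≠ [] := by
  obtain ⟨q, ps', rfl⟩ := List.exists_cons_of_ne_nil hps
  rw [pv_keys_ofList]; simp [PySem.Set.ofList_cons]

-- B's side string as a ' + '.join over the keys
theorem pv_side_eq_keys (d : PySem.Dict String Int) (hnd : d.keys.Nodup) :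
    pvSide d = PySem.Str.join " + " (d.keys.map (fun k => PySem.Str.join " " (pvTok d k))) := by
  unfold pvSide
  rw [PySem.Dict.items_eq_map_keys d hnd 0, List.map_map]
  congr 1
  apply List.map_congr_left
  intro k _
  simp only [Function.comp]
  unfold pvTerm pvTok
  split_ifs with hgt
  · rw [List.singleton_append, pv_join_cons_cons, pv_join_singleton]
  · rw [List.nil_append, pv_join_singleton]

-- one side: A's dropLast-of-chunks string equals the ' + '.join of the side's terms
theorem pv_side_main (ps : List (String × Int)) (hps : ps ≠ []) :
    PySem.Str.join " " (((PySem.Dict.ofList ps).keys.flatMap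
        (fun i => pvTok (PySem.Dict.ofList ps) i ++ ["+"])).dropLast)
    = pvSide (PySem.Dict.ofList ps) := by
  rw [pv_join_plus _ _ (fun i _ => pvTok_ne_nil _ i) (pv_keys_ofList_ne_nil ps hps),
      pv_side_eq_keys _ (PySem.Dict.nodup_keys_ofList ps)]

theorem pv_items_ne_nil (ps : List (String × Int)) (hps : ps ≠ []) :
    (PySem.Dict.ofList ps).items ≠ [] := by
  intro h
  exact pv_keys_ofList_ne_nil ps hps (by simp [PySem.Dict.keys, h])

-- one-step unfolding of B's recursion on a cons cell
theorem pvRecB_cons (atype : String) (arrowAt : Nat) (q : String × Int)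
    (rest : List (String × Int)) (i : Nat) :
    pvRecB atype arrowAt (q :: rest) i
    = if rest = [] then (if q.2 > 1 then PySem.Int.toStr q.2 ++ " " ++ q.1 else q.1)
      else (if q.2 > 1 then PySem.Int.toStr q.2 ++ " " ++ q.1 else q.1) ++ " "
           ++ (if i + 1 = arrowAt then atype else "+") ++ " "
           ++ pvRecB atype arrowAt rest (i + 1) := rfl

-- B's recursion with the arrow index out of the separator range is the plain ' + '.join
theorem pvRecB_plain (atype : String) (arrowAt : Nat) (l : List (String × Int)) (i : Nat)
    (hl : l ≠ []) (hout : arrowAt ≤ i ∨ l.length + i ≤ arrowAt) :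
    pvRecB atype arrowAt l i = PySem.Str.join " + " (l.map (fun q => pvTerm q.1 q.2)) := by
  induction l generalizing i with
  | nil => exact absurd rfl hl
  | cons q l' ih =>
    cases l' with
    | nil => simp [pvRecB, pvTerm, pv_join_singleton]
    | cons q2 l'' =>
      have hsep : ¬ (i + 1 = arrowAt) := by
        rcases hout with h | h
        · omega
        · simp only [List.length_cons] at h; omega
      rw [pvRecB_cons, if_neg (by simp : ¬ (q2 :: l'' = ([] : List (String × Int)))),
          if_neg hsep,
          ih (i + 1) (by simp)
            (by rcases hout with h | h
                · exact Or.inl (by omega)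
                · refine Or.inr ?_; simp only [List.length_cons] at h ⊢; omega)]
      simp only [List.map_cons]
      rw [pv_join_cons_cons]
      simp [pvTerm, String.append_assoc]

-- B's recursion across the boundary: the arrow separator exactly once, then the two joined sides
theorem pvRecB_split (atype : String) (xs ys : List (String × Int)) (i arrowAt : Nat)
    (hx : xs ≠ []) (hy : ys ≠ []) (harrow : arrowAt = i + xs.length) :
    pvRecB atype arrowAt (xs ++ ys) i
    = PySem.Str.join " + " (xs.map (fun q => pvTerm q.1 q.2)) ++ " " ++ atype ++ " "
      ++ PySem.Str.join " + " (ys.map (fun q => pvTerm q.1 q.2)) := by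
  induction xs generalizing i arrowAt with
  | nil => exact absurd rfl hx
  | cons q xs' ih =>
    cases xs' with
    | nil =>
      have hsep : i + 1 = arrowAt := by simp [harrow]
      rw [List.singleton_append, pvRecB_cons, if_neg hy, if_pos hsep,
          pvRecB_plain atype arrowAt ys (i + 1) hy (Or.inl (by omega))]
      simp only [List.map_cons, List.map_nil]
      rw [pv_join_singleton]
      simp [pvTerm, String.append_assoc]
    | cons q2 xs'' =>
      have hsep : ¬ (i + 1 = arrowAt) := by
        simp only [harrow, List.length_cons]; omega
      rw [List.cons_append, pvRecB_cons,
          if_neg (by simp : ¬ ((q2 :: xs'') ++ ys = ([] : List (String × Int)))),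
          if_neg hsep,
          ih (i + 1) arrowAt (by simp) (by simp only [harrow, List.length_cons]; omega)]
      simp only [List.map_cons]
      rw [pv_join_cons_cons]
      simp [pvTerm, String.append_assoc]

-- ===== VERDICT (by name: the statement is the Claim_ definition above) =====
theorem chemical_equation_string_spec : Claim_equal_chemical_equation_string := by
  intro vals atype _hdom hpre
  obtain ⟨hlen, hhead⟩ := hpre
  match vals, hlen with
  | v0 :: v1 :: rest, _ =>
  have hv0 : v0 ≠ [] := by simpa using hhead
  unfold Spec_chemical_equation_string chemical_equation_string chemical_equation_string_alt
  have hg0 : (PySem.List.pyGet? (v0 :: v1 :: rest) (0:Int)).getD [] = v0 := by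
    have h0 : (0:Int) ≤ (rest.length:Int) + 1 := by positivity
    simp [PySem.List.pyGet?, PySem.List.pyIdx?, h0]
  have hg1 : (PySem.List.pyGet? (v0 :: v1 :: rest) (1:Int)).getD [] = v1 := by
    simp [PySem.List.pyGet?, PySem.List.pyIdx?]
  dsimp only
  rw [hg0, hg1]
  rw [pv_foldA, pv_foldA, List.nil_append]
  have hRitems : (PySem.Dict.ofList v0).items ≠ [] := pv_items_ne_nil v0 hv0
  have hsz : (PySem.Dict.ofList v0).size = (PySem.Dict.ofList v0).items.length := rfl
  by_cases hv1 : v1 = []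
  · subst hv1
    rw [show (PySem.Dict.ofList ([] : List (String × Int))).keys = [] from rfl,
        show (PySem.Dict.ofList ([] : List (String × Int))).items = [] from rfl]
    simp only [List.flatMap_nil, List.append_nil, List.dropLast_concat]
    rw [pv_side_main v0 hv0,
        pvRecB_plain atype _ _ 0 hRitems (Or.inr (by rw [hsz]; omega))]
    rfl
  · have hk1 : (PySem.Dict.ofList v1).keys ≠ [] := pv_keys_ofList_ne_nil v1 hv1
    have hPitems : (PySem.Dict.ofList v1).items ≠ [] := pv_items_ne_nil v1 hv1
    have hPflat : ((PySem.Dict.ofList v1).keys.flatMap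
        (fun i => pvTok (PySem.Dict.ofList v1) i ++ ["+"])) ≠ [] := by
      obtain ⟨k, ks, hks⟩ := List.exists_cons_of_ne_nil hk1
      rw [hks, List.flatMap_cons]
      simp [pvTok_ne_nil]
    have hRd : (((PySem.Dict.ofList v0).keys.flatMap
        (fun i => pvTok (PySem.Dict.ofList v0) i ++ ["+"])).dropLast) ≠ [] :=
      pv_drop_ne_nil _ _ (fun i _ => pvTok_ne_nil _ i) (pv_keys_ofList_ne_nil v0 hv0)
    have hPd : (((PySem.Dict.ofList v1).keys.flatMap
        (fun i => pvTok (PySem.Dict.ofList v1) i ++ ["+"])).dropLast) ≠ [] :=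
      pv_drop_ne_nil _ _ (fun i _ => pvTok_ne_nil _ i) hk1
    rw [List.dropLast_append_of_ne_nil hPflat,
        pv_join_append " " _ _ (by simp) hPd,
        pv_join_append " " _ _ hRd (by simp),
        pv_join_singleton, pv_side_main v0 hv0, pv_side_main v1 hv1,
        pvRecB_split atype _ _ 0 _ hRitems hPitems (by rw [hsz]; omega)]
    rfl
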